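-- pv_equiv track=rewrite | github.com/Siddharth1047/code-till-job | Day-47.py | sandwich
-- ===== SOURCE A (Python) =====
-- def sandwich(string):
--     arr = list(string)
--     n = len(arr)
--
--     i = 1
--     vowels = ['a','e','i','o','u','A','E','I','O','U']
--
--     while i < n - 1:
--         if arr[i] in vowels and arr[i - 1] not in vowels and arr[i + 1] not in vowels:
--             arr.pop(i)
--             n -= 1
--         else:
--             i += 1
--
--     return ''.join(arr)
-- ===== SOURCE B (Python) =====
-- def sandwich(string):
--     vowels = set('aeiouAEIOU')
--     if len(string) < 2:
--         return string
--     out = [string[0]]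
--     for c, nxt in zip(string[1:], string[2:]):
--         if not (c in vowels and out[-1] not in vowels and nxt not in vowels):
--             out.append(c)
--     out.append(string[-1])
--     return ''.join(out)
-- ===== Notes on version B (the rewrite author's own statement) =====
-- stated objective: faster
-- what changed: Replaced the O(n^2) while-loop that pops sandwiched vowels from the array in place (each pop shifts the tail) with a single left-to-right pass that keeps an output list, comparing each char against the last kept char and the next original char.
import Mathlib
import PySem

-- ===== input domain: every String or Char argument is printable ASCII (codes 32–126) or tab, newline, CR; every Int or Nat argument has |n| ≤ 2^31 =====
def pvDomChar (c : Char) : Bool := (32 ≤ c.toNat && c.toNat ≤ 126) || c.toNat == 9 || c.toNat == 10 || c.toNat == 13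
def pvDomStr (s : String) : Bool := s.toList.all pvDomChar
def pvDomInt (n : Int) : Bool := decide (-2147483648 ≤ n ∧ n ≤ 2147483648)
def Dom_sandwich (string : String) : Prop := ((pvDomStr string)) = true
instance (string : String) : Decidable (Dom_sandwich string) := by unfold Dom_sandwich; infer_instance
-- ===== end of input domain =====

-- B replaces A's quadratic in-place pop/rescan loop by a single left-to-right pass
-- (left neighbour = last kept char, right neighbour = next original char); objective: faster.


-- ===== PORT A =====
def vowelsA : List Char := ['a','e','i','o','u','A','E','I','O','U']

-- the while loop; `i + 1 < arr.length` is Python's `i < n - 1` (equivalent over ints for n ≥ 0),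
-- `getD` is exact here since every index used is in range when the loop body runs (i ≥ 1 always)
def sandwichLoop (arr : List Char) (i : Nat) : List Char :=
  if h : i + 1 < arr.length then
    if vowelsA.contains (arr.getD i ' ') && !vowelsA.contains (arr.getD (i - 1) ' ')
        && !vowelsA.contains (arr.getD (i + 1) ' ') then
      sandwichLoop (arr.eraseIdx i) i
    else
      sandwichLoop arr (i + 1)
  else arr
termination_by 2 * arr.length - i
decreasing_by
  · have : (arr.eraseIdx i).length = arr.length - 1 := by
      apply List.length_eraseIdx_of_lt; omega
    omega
  · omega

def sandwich (string : String) : String :=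
  String.ofList (sandwichLoop string.toList 1)

-- ===== PORT B =====
def isVB (c : Char) : Bool := "aeiouAEIOU".toList.contains c

def stepB (out : List Char) (p : Char × Char) : List Char :=
  if !(isVB p.1 && !isVB (out.getLastD ' ') && !isVB p.2) then out ++ [p.1] else out

def sandwich_alt (string : String) : String :=
  if string.toList.length < 2 then string
  else
    String.ofList
      ((((string.toList.drop 1).zip (string.toList.drop 2)).foldl stepB [string.toList.headD ' '])
        ++ [string.toList.getLastD ' '])

-- ===== PRECONDITION & SPEC =====
def Spec_sandwich (string : String) (out : String) : Prop := out = sandwich_alt string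
instance (string : String) (out : String) : Decidable (Spec_sandwich string out) := by unfold Spec_sandwich; infer_instance

-- ===== CLAIM (what is proved, stated in full; the proofs are below) =====
def Claim_equal_sandwich : Prop := ∀ (string : String), Dom_sandwich string → Spec_sandwich string (sandwich string)

-- ===== LEMMAS AND PROOFS =====

-- common recursive characterisation of the result on the suffix `rem`,
-- given the last kept character `prev`
def goS (prev : Char) : List Char → List Char
  | [] => []
  | [c] => [c]
  | c :: d :: rest =>
      if isVB c && !isVB prev && !isVB d then goS prev (d :: rest)
      else c :: goS c (d :: rest)

-- variant that drops the (always kept) last element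
def goS' (prev : Char) : List Char → List Char
  | [] => []
  | [_] => []
  | c :: d :: rest =>
      if isVB c && !isVB prev && !isVB d then goS' prev (d :: rest)
      else c :: goS' c (d :: rest)

theorem vowelsA_eq_isVB (c : Char) : vowelsA.contains c = isVB c := by
  have : "aeiouAEIOU".toList = vowelsA := by decide
  simp [isVB, this]

theorem getD_append_len (k : List Char) (c : Char) (l : List Char) :
    (k ++ c :: l).getD k.length ' ' = c := by
  simp

theorem getD_append_prev (k : List Char) (hk : k ≠ []) (rest : List Char) :
    (k ++ rest).getD (k.length - 1) ' ' = k.getLastD ' ' := by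
  induction k with
  | nil => simp at hk
  | cons a k ih =>
    cases k with
    | nil => rfl
    | cons b k' =>
      have := ih (by simp)
      simpa [List.getLastD] using this

theorem eraseIdx_append_len (k : List Char) (c : Char) (l : List Char) :
    (k ++ c :: l).eraseIdx k.length = k ++ l := by
  induction k with
  | nil => rfl
  | cons a k ih => simpa using ih

theorem loopA_eq (rem kept : List Char) (hk : kept ≠ []) :
    sandwichLoop (kept ++ rem) kept.length = kept ++ goS (kept.getLastD ' ') rem := by
  induction rem generalizing kept with
  | nil =>
    rw [sandwichLoop]
    simp [goS]
  | cons c tail ih =>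
    cases tail with
    | nil =>
      rw [sandwichLoop]
      simp [goS]
    | cons d rest =>
      rw [sandwichLoop]
      have hlen : kept.length + 1 < (kept ++ c :: d :: rest).length := by
        simp
      rw [dif_pos hlen]
      have h1 : (kept ++ c :: d :: rest).getD kept.length ' ' = c := getD_append_len ..
      have h2 : (kept ++ c :: d :: rest).getD (kept.length - 1) ' ' = kept.getLastD ' ' :=
        getD_append_prev kept hk _
      have h3 : (kept ++ c :: d :: rest).getD (kept.length + 1) ' ' = d := by
        simp
      rw [h1, h2, h3, vowelsA_eq_isVB, vowelsA_eq_isVB, vowelsA_eq_isVB]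
      by_cases hc : (isVB c && !isVB (kept.getLastD ' ') && !isVB d) = true
      · rw [if_pos hc, eraseIdx_append_len, ih kept hk]
        have hg : goS (kept.getLastD ' ') (c :: d :: rest) = goS (kept.getLastD ' ') (d :: rest) := by
          simp only [goS]; rw [if_pos hc]
        rw [hg]
      · rw [if_neg hc]
        have harr : kept ++ c :: d :: rest = (kept ++ [c]) ++ d :: rest := by simp
        rw [harr]
        have hlen2 : (kept ++ [c]).length = kept.length + 1 := by simp
        rw [← hlen2, ih (kept ++ [c]) (by simp)]
        have hg : goS (kept.getLastD ' ') (c :: d :: rest) = c :: goS c (d :: rest) := by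
          simp only [goS]; rw [if_neg hc]
        rw [hg, List.getLastD_concat]
        simp

theorem foldB_eq (rem out : List Char) (ho : out ≠ []) :
    (rem.zip (rem.drop 1)).foldl stepB out = out ++ goS' (out.getLastD ' ') rem := by
  induction rem generalizing out with
  | nil => simp [goS']
  | cons c tail ih =>
    cases tail with
    | nil => simp [goS']
    | cons d rest =>
      simp only [List.drop_succ_cons, List.drop_zero, List.zip_cons_cons, List.foldl_cons]
      cases hc : isVB c && !isVB (out.getLastD ' ') && !isVB d with
      | true =>
        have hstep : stepB out (c, d) = out := by
          simp only [stepB]; rw [hc]; simp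
        have hg : goS' (out.getLastD ' ') (c :: d :: rest) = goS' (out.getLastD ' ') (d :: rest) := by
          simp only [goS']; rw [if_pos hc]
        rw [hstep, hg]
        have := ih out ho
        simpa using this
      | false =>
        have hstep : stepB out (c, d) = out ++ [c] := by
          simp only [stepB]; rw [hc]; simp
        have hg : goS' (out.getLastD ' ') (c :: d :: rest) = c :: goS' c (d :: rest) := by
          simp only [goS']; rw [if_neg (ne_true_of_eq_false hc)]
        rw [hstep, hg]
        have := ih (out ++ [c]) (by simp)
        rw [List.getLastD_concat] at this
        simpa using this

theorem goS_eq_goS' (rem : List Char) (hr : rem ≠ []) (prev : Char) :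
    goS prev rem = goS' prev rem ++ [rem.getLastD ' '] := by
  induction rem generalizing prev with
  | nil => simp at hr
  | cons c tail ih =>
    cases tail with
    | nil => simp [goS, goS']
    | cons d rest =>
      simp only [goS, goS']
      by_cases hc : (isVB c && !isVB prev && !isVB d) = true
      · rw [if_pos hc, if_pos hc, ih (by simp) prev]
        rfl
      · rw [if_neg hc, if_neg hc, ih (by simp) c]
        rfl

-- ===== VERDICT (by name: the statement is the Claim_ definition above) =====
theorem sandwich_spec : Claim_equal_sandwich := by
  intro string _
  unfold Spec_sandwich sandwich sandwich_alt
  cases hs : string.toList with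
  | nil =>
    rw [if_pos (by simp), sandwichLoop, dif_neg (by simp)]
    conv_rhs => rw [← string.ofList_toList, hs]
  | cons a rem =>
    cases rem with
    | nil =>
      rw [if_pos (by simp), sandwichLoop, dif_neg (by simp)]
      conv_rhs => rw [← string.ofList_toList, hs]
    | cons b rest =>
      have hA : sandwichLoop (a :: b :: rest) 1 = [a] ++ goS a (b :: rest) := by
        have := loopA_eq (b :: rest) [a] (by simp)
        simpa using this
      have hB := foldB_eq (b :: rest) [a] (by simp)
      have hgo := goS_eq_goS' (b :: rest) (by simp) a
      rw [if_neg (by simp), hA]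
      simp only [List.headD_cons, List.drop_succ_cons, List.drop_zero]
      simp only [List.drop_succ_cons, List.drop_zero] at hB
      rw [hB]
      have hlast : (a :: b :: rest).getLastD ' ' = (b :: rest).getLastD ' ' := rfl
      rw [hlast]
      simp [hgo]
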